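-- pv_equiv track=rewrite | github.com/NaveenKumar-G-AI/PrepVista-AI | app/services/evaluator.py | _looks_too_generic_for_question
-- ===== SOURCE A (Python) =====
-- def _safe_text(value) -> str:
--     if value is None:
--         return ""
--     if isinstance(value, str):
--         return value.strip()
--     return str(value).strip()
--
-- def _looks_too_generic_for_question(text: str, question_text: str, rubric_category: str) -> bool:
--     normalized = _safe_text(text).lower()
--     question = _safe_text(question_text).lower()
--     if not normalized:
--         return True
--     generic_prefixes = (
--         "in that work, i handled",
--         "my project is a strong example because",
--         "i'm targeting roles where i can combine",
--         "in the project, i worked on make a practical decision",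
--         "i used the method for the part of the work",
--         "i was balancing two useful options under a real constraint",
--     )
--     if any(normalized.startswith(prefix) for prefix in generic_prefixes):
--         return True
--     if any(term in question for term in ["tool", "technology", "fastapi", "method"]) and "tool" not in normalized and "method" not in normalized and "fastapi" not in normalized:
--         return True
--     if rubric_category == "project_ownership" and "owned" not in normalized and "respons" not in normalized:
--         return True
--     if any(term in question for term in ["measure", "metric", "validate", "benchmark"]) and not any(term in normalized for term in ["measure", "metric", "compare", "check", "validate"]):
--         return True
--     if any(term in question for term in ["hire you", "fit the role", "stronger fit", "remember you", "stand out", "trust you early", "add value early"]) and not any(term in normalized for term in ["hire", "fit", "role", "remember", "stand out", "value", "contribute", "early"]):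
--         return True
--     if any(term in question for term in ["first priority", "first 30 days", "first month", "if we hired you"]) and not any(term in normalized for term in ["first", "priority", "start", "join", "focus"]):
--         return True
--     if any(term in question for term in ["pressure", "feedback", "deadline", "team"]) and not any(term in normalized for term in ["pressure", "feedback", "deadline", "team", "learned", "taught"]):
--         return True
--     return False
-- ===== SOURCE B (Python) =====
-- _GENERIC_PREFIXES = (
--     "in that work, i handled",
--     "my project is a strong example because",
--     "i'm targeting roles where i can combine",
--     "in the project, i worked on make a practical decision",
--     "i used the method for the part of the work",
--     "i was balancing two useful options under a real constraint",
-- )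
--
-- # Inverted index, flattened to (term, rule_id) pairs.
-- # A rule fires when some trigger term occurs in the question, and rule 5
-- # ("project_ownership") when the rubric category says so.
-- _QUESTION_TRIGGERS = [
--     ("tool", 0), ("technology", 0), ("fastapi", 0), ("method", 0),
--     ("measure", 1), ("metric", 1), ("validate", 1), ("benchmark", 1),
--     ("hire you", 2), ("fit the role", 2), ("stronger fit", 2), ("remember you", 2),
--     ("stand out", 2), ("trust you early", 2), ("add value early", 2),
--     ("first priority", 3), ("first 30 days", 3), ("first month", 3), ("if we hired you", 3),
--     ("pressure", 4), ("feedback", 4), ("deadline", 4), ("team", 4),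
-- ]
--
-- # A fired rule is defused when some of these answer terms occurs in the answer.
-- _ANSWER_SATISFIERS = [
--     ("tool", 0), ("method", 0), ("fastapi", 0),
--     ("measure", 1), ("metric", 1), ("compare", 1), ("check", 1), ("validate", 1),
--     ("hire", 2), ("fit", 2), ("role", 2), ("remember", 2), ("stand out", 2),
--     ("value", 2), ("contribute", 2), ("early", 2),
--     ("first", 3), ("priority", 3), ("start", 3), ("join", 3), ("focus", 3),
--     ("pressure", 4), ("feedback", 4), ("deadline", 4), ("team", 4),
--     ("learned", 4), ("taught", 4),
--     ("owned", 5), ("respons", 5),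
-- ]
--
-- def _looks_too_generic_for_question(text: str, question_text: str, rubric_category: str) -> bool:
--     normalized = text.strip().lower()
--     if not normalized:
--         return True
--     if normalized.startswith(_GENERIC_PREFIXES):
--         return True
--     question = question_text.strip().lower()
--     triggered = [rule for term, rule in _QUESTION_TRIGGERS if term in question]
--     if rubric_category == "project_ownership":
--         triggered.append(5)
--     satisfied = [rule for term, rule in _ANSWER_SATISFIERS if term in normalized]
--     return any(rule not in satisfied for rule in triggered)
-- ===== Notes on version B (the rewrite author's own statement) =====
-- stated objective: alternative
-- what changed: Replaced A's chain of per-rule if-returns by an inverted term-to-rule-id index: two flat comprehension passes build the triggered and satisfied rule-id lists (the rubric special case just appends rule 5), and one membership test over them gives the verdict; the empty-answer and generic-prefix early returns stay.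
import Mathlib
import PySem

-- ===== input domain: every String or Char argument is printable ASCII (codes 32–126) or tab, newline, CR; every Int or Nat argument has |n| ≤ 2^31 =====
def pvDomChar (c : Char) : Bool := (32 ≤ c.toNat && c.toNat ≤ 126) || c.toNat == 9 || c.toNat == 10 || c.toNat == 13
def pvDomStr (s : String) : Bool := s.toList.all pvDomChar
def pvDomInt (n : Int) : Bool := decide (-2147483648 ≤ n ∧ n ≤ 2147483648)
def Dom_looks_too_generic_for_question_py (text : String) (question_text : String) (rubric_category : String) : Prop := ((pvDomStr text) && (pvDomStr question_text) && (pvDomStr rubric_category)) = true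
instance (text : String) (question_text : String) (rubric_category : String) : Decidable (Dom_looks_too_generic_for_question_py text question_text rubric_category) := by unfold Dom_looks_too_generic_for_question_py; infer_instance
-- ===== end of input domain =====

-- B replaces A's chain of per-rule if-returns by an inverted term→rule index: two flat
-- passes build the triggered and satisfied rule-id lists, then one membership test (alternative; same cost).

-- ===== PORT A =====
-- literal transliteration of A's if-return chain
def looks_too_generic_for_question_py (text : String) (question_text : String) (rubric_category : String) : Bool :=
  let normalized := PySem.Str.lower (PySem.Str.strip text)
  let question := PySem.Str.lower (PySem.Str.strip question_text)
  if normalized == "" then true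
  else if ([ "in that work, i handled",
             "my project is a strong example because",
             "i'm targeting roles where i can combine",
             "in the project, i worked on make a practical decision",
             "i used the method for the part of the work",
             "i was balancing two useful options under a real constraint"
           ].any (fun p => PySem.Str.startswith normalized p)) then true
  else if (["tool", "technology", "fastapi", "method"].any (fun t => PySem.Str.isIn t question))
          && !PySem.Str.isIn "tool" normalized && !PySem.Str.isIn "method" normalized
          && !PySem.Str.isIn "fastapi" normalized then true
  else if (rubric_category == "project_ownership") && !PySem.Str.isIn "owned" normalized
          && !PySem.Str.isIn "respons" normalized then true
  else if (["measure", "metric", "validate", "benchmark"].any (fun t => PySem.Str.isIn t question))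
          && !(["measure", "metric", "compare", "check", "validate"].any (fun t => PySem.Str.isIn t normalized)) then true
  else if (["hire you", "fit the role", "stronger fit", "remember you", "stand out", "trust you early", "add value early"].any (fun t => PySem.Str.isIn t question))
          && !(["hire", "fit", "role", "remember", "stand out", "value", "contribute", "early"].any (fun t => PySem.Str.isIn t normalized)) then true
  else if (["first priority", "first 30 days", "first month", "if we hired you"].any (fun t => PySem.Str.isIn t question))
          && !(["first", "priority", "start", "join", "focus"].any (fun t => PySem.Str.isIn t normalized)) then true
  else if (["pressure", "feedback", "deadline", "team"].any (fun t => PySem.Str.isIn t question))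
          && !(["pressure", "feedback", "deadline", "team", "learned", "taught"].any (fun t => PySem.Str.isIn t normalized)) then true
  else false

-- ===== PORT B =====
def pvGenericPrefixes : List String :=
  [ "in that work, i handled",
    "my project is a strong example because",
    "i'm targeting roles where i can combine",
    "in the project, i worked on make a practical decision",
    "i used the method for the part of the work",
    "i was balancing two useful options under a real constraint" ]

-- inverted index of Source B: flat (term, rule id) pairs
def pvQuestionTriggers : List (String × Int) :=
  [ ("tool", 0), ("technology", 0), ("fastapi", 0), ("method", 0),
    ("measure", 1), ("metric", 1), ("validate", 1), ("benchmark", 1),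
    ("hire you", 2), ("fit the role", 2), ("stronger fit", 2), ("remember you", 2),
    ("stand out", 2), ("trust you early", 2), ("add value early", 2),
    ("first priority", 3), ("first 30 days", 3), ("first month", 3), ("if we hired you", 3),
    ("pressure", 4), ("feedback", 4), ("deadline", 4), ("team", 4) ]

def pvAnswerSatisfiers : List (String × Int) :=
  [ ("tool", 0), ("method", 0), ("fastapi", 0),
    ("measure", 1), ("metric", 1), ("compare", 1), ("check", 1), ("validate", 1),
    ("hire", 2), ("fit", 2), ("role", 2), ("remember", 2), ("stand out", 2),
    ("value", 2), ("contribute", 2), ("early", 2),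
    ("first", 3), ("priority", 3), ("start", 3), ("join", 3), ("focus", 3),
    ("pressure", 4), ("feedback", 4), ("deadline", 4), ("team", 4),
    ("learned", 4), ("taught", 4),
    ("owned", 5), ("respons", 5) ]

def looks_too_generic_for_question_py_alt (text : String) (question_text : String) (rubric_category : String) : Bool :=
  let normalized := PySem.Str.lower (PySem.Str.strip text)
  if normalized == "" then true
  else if pvGenericPrefixes.any (fun p => PySem.Str.startswith normalized p) then true
  else
    let question := PySem.Str.lower (PySem.Str.strip question_text)
    let triggered := (pvQuestionTriggers.filter (fun p => PySem.Str.isIn p.1 question)).map Prod.snd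
    let triggered := if rubric_category == "project_ownership" then triggered ++ [(5 : Int)] else triggered
    let satisfied := (pvAnswerSatisfiers.filter (fun p => PySem.Str.isIn p.1 normalized)).map Prod.snd
    triggered.any (fun rule => !(satisfied.contains rule))

-- ===== PRECONDITION & SPEC =====
def Spec_looks_too_generic_for_question_py (text : String) (question_text : String) (rubric_category : String) (out : Bool) : Prop := out = looks_too_generic_for_question_py_alt text question_text rubric_category
instance (text : String) (question_text : String) (rubric_category : String) (out : Bool) : Decidable (Spec_looks_too_generic_for_question_py text question_text rubric_category out) := by unfold Spec_looks_too_generic_for_question_py; infer_instance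

-- ===== CLAIM (what is proved, stated in full; the proofs are below) =====
def Claim_equal_looks_too_generic_for_question_py : Prop := ∀ (text : String) (question_text : String) (rubric_category : String), Dom_looks_too_generic_for_question_py text question_text rubric_category → Spec_looks_too_generic_for_question_py text question_text rubric_category (looks_too_generic_for_question_py text question_text rubric_category)

-- ===== LEMMAS AND PROOFS =====

-- any over the rule-ids kept by a filtered inverted index = any over the index itself
theorem pv_filter_map_any {α β : Type} (l : List (α × β)) (f : α × β → Bool) (g : β → Bool) :
    ((l.filter f).map Prod.snd).any g = l.any (fun p => f p && g p.2) := by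
  induction l with
  | nil => rfl
  | cons hd tl ih =>
      by_cases h : f hd = true <;> simp [h, ih]

-- membership of a rule id in the filtered inverted index
theorem pv_filter_map_contains {α β : Type} [BEq β] (l : List (α × β)) (f : α × β → Bool) (y : β) :
    ((l.filter f).map Prod.snd).contains y = l.any (fun p => f p && (y == p.2)) := by
  induction l with
  | nil => rfl
  | cons hd tl ih =>
      by_cases h : f hd = true <;> simp [h, List.contains_cons, ih]

-- the conditional append of the ownership rule id
theorem pv_any_if_append {β : Type} (b : Bool) (l : List β) (x : β) (f : β → Bool) :
    ((if b then l ++ [x] else l).any f) = (l.any f || (b && f x)) := by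
  cases b <;> simp [List.any_append]

-- any over a group of the inverted index with one shared rule id
theorem pv_map_any {β : Type} (terms : List String) (j : β) (f : String × β → Bool) :
    (terms.map (fun t => (t, j))).any f = terms.any (fun t => f (t, j)) := by
  induction terms with
  | nil => rfl
  | cons hd tl ih => simp [ih]

theorem pv_any_false {α : Type} (l : List α) : (l.any fun _ => false) = false := by simp

theorem pv_any3 {α : Type} (a b c : α) (f : α → Bool) :
    ([a, b, c].any f) = (f a || (f b || f c)) := by simp

theorem pv_any2 {α : Type} (a b : α) (f : α → Bool) :
    ([a, b].any f) = (f a || f b) := by simp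

-- factor a constant conjunct out of an any
theorem pv_any_and_const {α : Type} (l : List α) (F : α → Bool) (c : Bool) :
    (l.any (fun t => F t && c)) = (l.any F && c) := by
  cases c <;> simp

theorem pv_split_trig : pvQuestionTriggers =
    (["tool", "technology", "fastapi", "method"].map (fun t => (t, (0 : Int)))) ++
    (["measure", "metric", "validate", "benchmark"].map (fun t => (t, (1 : Int)))) ++
    (["hire you", "fit the role", "stronger fit", "remember you", "stand out", "trust you early", "add value early"].map (fun t => (t, (2 : Int)))) ++
    (["first priority", "first 30 days", "first month", "if we hired you"].map (fun t => (t, (3 : Int)))) ++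
    (["pressure", "feedback", "deadline", "team"].map (fun t => (t, (4 : Int)))) := rfl

theorem pv_split_sat : pvAnswerSatisfiers =
    (["tool", "method", "fastapi"].map (fun t => (t, (0 : Int)))) ++
    (["measure", "metric", "compare", "check", "validate"].map (fun t => (t, (1 : Int)))) ++
    (["hire", "fit", "role", "remember", "stand out", "value", "contribute", "early"].map (fun t => (t, (2 : Int)))) ++
    (["first", "priority", "start", "join", "focus"].map (fun t => (t, (3 : Int)))) ++
    (["pressure", "feedback", "deadline", "team", "learned", "taught"].map (fun t => (t, (4 : Int)))) ++
    (["owned", "respons"].map (fun t => (t, (5 : Int)))) := rfl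

-- boolean skeleton: A's if-return chain equals B's flat triggered/satisfied disjunction
theorem pv_chain (c0 c1 tq t m f po o r c4 c5 c6 c7 : Bool) :
    (if c0 = true then true else if c1 = true then true else
     if (tq && !t && !m && !f) = true then true else
     if (po && !o && !r) = true then true else
     if c4 = true then true else if c5 = true then true else
     if c6 = true then true else if c7 = true then true else false)
    =
    (if c0 = true then true else if c1 = true then true else
     ((((tq && !(t || (m || f)) || c4) || c5) || c6) || c7) || (po && !(o || r))) := by
  cases c0 <;> cases c1 <;> cases tq <;> cases t <;> cases m <;> cases f <;>
    cases po <;> cases o <;> cases r <;> cases c4 <;> cases c5 <;> cases c6 <;> cases c7 <;> rfl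

-- ===== VERDICT (by name: the statement is the Claim_ definition above) =====
set_option maxHeartbeats 2000000 in
theorem looks_too_generic_for_question_py_spec : Claim_equal_looks_too_generic_for_question_py := by
  intro text question_text rubric_category _
  unfold Spec_looks_too_generic_for_question_py
  unfold looks_too_generic_for_question_py looks_too_generic_for_question_py_alt
  simp only [pvGenericPrefixes]
  rw [pv_split_sat, pv_split_trig]
  simp only [pv_filter_map_contains, pv_filter_map_any, pv_any_if_append, List.any_append, pv_map_any]
  simp only [show ((0:Int) == 0) = true from rfl, show ((0:Int) == 1) = false from rfl,
    show ((0:Int) == 2) = false from rfl, show ((0:Int) == 3) = false from rfl,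
    show ((0:Int) == 4) = false from rfl, show ((0:Int) == 5) = false from rfl,
    show ((1:Int) == 0) = false from rfl, show ((1:Int) == 1) = true from rfl,
    show ((1:Int) == 2) = false from rfl, show ((1:Int) == 3) = false from rfl,
    show ((1:Int) == 4) = false from rfl, show ((1:Int) == 5) = false from rfl,
    show ((2:Int) == 0) = false from rfl, show ((2:Int) == 1) = false from rfl,
    show ((2:Int) == 2) = true from rfl, show ((2:Int) == 3) = false from rfl,
    show ((2:Int) == 4) = false from rfl, show ((2:Int) == 5) = false from rfl,
    show ((3:Int) == 0) = false from rfl, show ((3:Int) == 1) = false from rfl,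
    show ((3:Int) == 2) = false from rfl, show ((3:Int) == 3) = true from rfl,
    show ((3:Int) == 4) = false from rfl, show ((3:Int) == 5) = false from rfl,
    show ((4:Int) == 0) = false from rfl, show ((4:Int) == 1) = false from rfl,
    show ((4:Int) == 2) = false from rfl, show ((4:Int) == 3) = false from rfl,
    show ((4:Int) == 4) = true from rfl, show ((4:Int) == 5) = false from rfl,
    show ((5:Int) == 0) = false from rfl, show ((5:Int) == 1) = false from rfl,
    show ((5:Int) == 2) = false from rfl, show ((5:Int) == 3) = false from rfl,
    show ((5:Int) == 4) = false from rfl, show ((5:Int) == 5) = true from rfl,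
    Bool.and_false, Bool.and_true]
  simp only [pv_any_false, Bool.or_false, Bool.false_or]
  simp only [pv_any_and_const, pv_any3, pv_any2]
  exact pv_chain _ _ _ _ _ _ _ _ _ _ _ _ _
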